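-- pv_equiv track=rewrite | github.com/mcjcode/number-theory | bps.py | bps_w_sign_stack
-- ===== SOURCE A (Python) =====
-- def bps_w_sign_stack(ps, n):
--     """
--     For an increasing sequence ps of relatively
--     prime numbers ps and an upper bound n>=1, compute
--     all of the products <=n of subsets of xs, along
--     with a parity: +1 if an even number of elements
--     are used, -1 if an odd number are used.
--
--     This function proceeds depth first in the tree and
--     is non-recursive (it does not call it self and is not
--     limited by python's recursion depth bound)
--
--     Also, have found this 20x faster than bps_w_sign
--     """
--     s = [(+1, 1, 0)]
--     lenps = len(ps)
--     while s:
--         sgn, prd, idx = s.pop()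
--         if idx < lenps:
--             p = ps[idx]
--             if p*prd <= n:
--                 s.append(( sgn, prd,   idx+1))
--                 s.append((-sgn, prd*p, idx+1))
--                 continue
--         yield sgn, prd
-- ===== SOURCE B (Python) =====
-- def bps_w_sign_stack(ps, n):
--     def rec(sgn, prd, idx):
--         if idx < len(ps) and ps[idx] * prd <= n:
--             p = ps[idx]
--             yield from rec(-sgn, prd * p, idx + 1)
--             yield from rec(sgn, prd, idx + 1)
--         else:
--             yield sgn, prd
--     yield from rec(+1, 1, 0)
-- ===== Notes on version B (the rewrite author's own statement) =====
-- stated objective: simpler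
-- what changed: Replaced the explicit-stack non-recursive depth-first loop by a recursive generator over the subset-product tree (include branch first, then exclude), preserving the exact leaf sequence.
import Mathlib
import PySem

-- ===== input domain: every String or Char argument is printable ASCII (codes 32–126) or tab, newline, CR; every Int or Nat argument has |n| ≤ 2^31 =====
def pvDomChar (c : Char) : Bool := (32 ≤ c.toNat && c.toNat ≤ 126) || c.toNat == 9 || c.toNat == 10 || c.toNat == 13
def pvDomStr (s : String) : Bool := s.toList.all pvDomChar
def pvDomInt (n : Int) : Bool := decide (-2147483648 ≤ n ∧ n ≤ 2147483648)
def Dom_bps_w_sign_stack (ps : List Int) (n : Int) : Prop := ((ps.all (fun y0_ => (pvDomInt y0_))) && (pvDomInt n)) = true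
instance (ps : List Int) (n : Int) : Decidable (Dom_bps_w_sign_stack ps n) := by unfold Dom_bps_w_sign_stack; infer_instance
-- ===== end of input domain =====

-- B replaces A's explicit-stack depth-first loop by a recursive enumerator of the
-- subset-product tree (same leaves, same order); objective: simpler, same cost.
-- Both functions are Python generators; equivalence is about list(...) of the yields.

-- ===== PORT A =====
-- termination measure for the explicit stack: each entry (sgn, prd, idx) weighs 3^(len ps - idx)
def pvMeasureA (L : Nat) (s : List (Int × Int × Nat)) : Nat :=
  (s.map (fun t => 3 ^ (L - t.2.2))).sum

-- the while-s loop; stack head = top; Python's idx is always a nonnegative in-range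
-- index, so it is carried as a Nat and ps[idx] is List.getD (exact here since idx < len ps)
def pvLoopA (ps : List Int) (n : Int) (s : List (Int × Int × Nat)) : List (Int × Int) :=
  match s with
  | [] => []
  | (sgn, prd, idx) :: rest =>
    if idx < ps.length then
      if ps.getD idx 0 * prd ≤ n then
        pvLoopA ps n ((-sgn, prd * ps.getD idx 0, idx + 1) :: (sgn, prd, idx + 1) :: rest)
      else (sgn, prd) :: pvLoopA ps n rest
    else (sgn, prd) :: pvLoopA ps n rest
termination_by pvMeasureA ps.length s
decreasing_by
  · simp only [pvMeasureA, List.map_cons, List.sum_cons]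
    have hk : ps.length - idx = (ps.length - (idx + 1)) + 1 := by omega
    have hp : 0 < 3 ^ (ps.length - (idx + 1)) := Nat.pow_pos (by norm_num)
    rw [hk, pow_succ]
    omega
  · simp only [pvMeasureA, List.map_cons, List.sum_cons]
    have hp : 0 < 3 ^ (ps.length - idx) := Nat.pow_pos (by norm_num)
    omega
  · simp only [pvMeasureA, List.map_cons, List.sum_cons]
    have hp : 0 < 3 ^ (ps.length - idx) := Nat.pow_pos (by norm_num)
    omega

def bps_w_sign_stack (ps : List Int) (n : Int) : List (Int × Int) :=
  pvLoopA ps n [(1, 1, 0)]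

-- ===== PORT B =====
-- recursive generator rec(sgn, prd, idx): include branch first, then exclude branch
def pvRecB (ps : List Int) (n : Int) (sgn prd : Int) (idx : Nat) : List (Int × Int) :=
  if _h : idx < ps.length ∧ ps.getD idx 0 * prd ≤ n then
    pvRecB ps n (-sgn) (prd * ps.getD idx 0) (idx + 1) ++ pvRecB ps n sgn prd (idx + 1)
  else [(sgn, prd)]
termination_by ps.length - idx
decreasing_by all_goals omega

def bps_w_sign_stack_alt (ps : List Int) (n : Int) : List (Int × Int) :=
  pvRecB ps n 1 1 0

-- ===== PRECONDITION & SPEC =====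
def Spec_bps_w_sign_stack (ps : List Int) (n : Int) (out : List (Int × Int)) : Prop := out = bps_w_sign_stack_alt ps n
instance (ps : List Int) (n : Int) (out : List (Int × Int)) : Decidable (Spec_bps_w_sign_stack ps n out) := by unfold Spec_bps_w_sign_stack; infer_instance

-- ===== CLAIM (what is proved, stated in full; the proofs are below) =====
def Claim_equal_bps_w_sign_stack : Prop := ∀ (ps : List Int) (n : Int), Dom_bps_w_sign_stack ps n → Spec_bps_w_sign_stack ps n (bps_w_sign_stack ps n)

-- ===== LEMMAS AND PROOFS =====

-- the stack loop emits, in order, the recursive enumeration of each stack entry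
theorem pvLoopA_eq_flatMap (ps : List Int) (n : Int) (s : List (Int × Int × Nat)) :
    pvLoopA ps n s = s.flatMap (fun t => pvRecB ps n t.1 t.2.1 t.2.2) := by
  induction s using pvLoopA.induct ps n with
  | case1 => simp [pvLoopA]
  | case2 sgn prd idx rest h1 h2 ih =>
    rw [pvLoopA]
    simp only [if_pos h1, if_pos h2]
    rw [ih]
    simp only [List.flatMap_cons]
    conv_rhs => rw [pvRecB.eq_def]
    rw [dif_pos (And.intro h1 h2), List.append_assoc]
  | case3 sgn prd idx rest h1 h2 ih =>
    rw [pvLoopA]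
    simp only [if_pos h1, if_neg h2]
    rw [ih]
    simp only [List.flatMap_cons]
    conv_rhs => rw [pvRecB.eq_def]
    have hn : ¬ (idx < ps.length ∧ ps.getD idx 0 * prd ≤ n) := by tauto
    rw [dif_neg hn]; rfl
  | case4 sgn prd idx rest h1 ih =>
    rw [pvLoopA]
    simp only [if_neg h1]
    rw [ih]
    simp only [List.flatMap_cons]
    conv_rhs => rw [pvRecB.eq_def]
    have hn : ¬ (idx < ps.length ∧ ps.getD idx 0 * prd ≤ n) := by tauto
    rw [dif_neg hn]; rfl

-- ===== VERDICT (by name: the statement is the Claim_ definition above) =====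
theorem bps_w_sign_stack_spec : Claim_equal_bps_w_sign_stack := by
  intro ps n _
  unfold Spec_bps_w_sign_stack bps_w_sign_stack bps_w_sign_stack_alt
  rw [pvLoopA_eq_flatMap]
  simp
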